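-- pv_equiv track=rewrite | github.com/jlugo63/gavel | gavel-v2/gavel/sso.py | _map_groups_to_roles
-- ===== SOURCE A (Python) =====
-- def _map_groups_to_roles(groups: list[str], role_mapping: dict[str, str]) -> list[str]:
--     """Map IdP group names to Gavel role names."""
--     roles = set()
--     for group in groups:
--         if group in role_mapping:
--             roles.add(role_mapping[group])
--         # Also check case-insensitive
--         for mapping_key, role in role_mapping.items():
--             if group.lower() == mapping_key.lower():
--                 roles.add(role)
--     return sorted(roles)
-- ===== SOURCE B (Python) =====
-- def _map_groups_to_roles(groups: list[str], role_mapping: dict[str, str]) -> list[str]: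
--     """Map IdP group names to Gavel role names."""
--     lowered = {g.lower() for g in groups}
--     matched = [role for key, role in role_mapping.items() if key.lower() in lowered]
--     return sorted(set(matched))
-- ===== Notes on version B (the rewrite author's own statement) =====
-- stated objective: faster
-- what changed: Inverts the traversal and changes the pipeline: instead of A's nested loops accumulating into a set per group, B builds a set of lowercased group names once, filter-maps role_mapping.items() in a single pass into a list of matched roles, and returns sorted(set(matched)); A's exact-match lookup disappears (subsumed by the case-insensitive match).
import Mathlib
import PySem

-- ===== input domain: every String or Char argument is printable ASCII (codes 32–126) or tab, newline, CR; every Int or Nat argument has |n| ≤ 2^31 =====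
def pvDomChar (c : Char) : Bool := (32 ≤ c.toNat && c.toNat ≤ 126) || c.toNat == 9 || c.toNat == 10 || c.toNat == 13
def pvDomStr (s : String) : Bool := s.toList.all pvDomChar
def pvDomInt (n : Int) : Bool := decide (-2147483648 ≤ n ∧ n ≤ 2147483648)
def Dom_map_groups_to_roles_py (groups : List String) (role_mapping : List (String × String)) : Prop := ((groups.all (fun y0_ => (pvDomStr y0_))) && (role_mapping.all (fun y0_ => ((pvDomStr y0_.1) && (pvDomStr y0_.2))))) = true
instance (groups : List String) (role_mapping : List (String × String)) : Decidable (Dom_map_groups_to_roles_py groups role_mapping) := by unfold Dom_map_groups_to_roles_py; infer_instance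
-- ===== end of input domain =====

-- B replaces A's nested loops (per group, rescan all mapping items into a mutating set) by a
-- staged pipeline: one lowercased-group set, one filter-map pass over the items, then sorted(set(...)).

-- ===== PORT A =====
-- A: roles = set(); for each group, add role_mapping[group] if present, then scan all items case-insensitively; sorted(roles).
def map_groups_to_roles_py (groups : List String) (role_mapping : List (String × String)) : List String :=
  let d := PySem.Dict.ofList role_mapping
  let roles : PySem.Set String :=
    groups.foldl (fun roles group =>
      let roles := match d.get? group with
        | some r => PySem.Set.add roles r
        | none => roles
      d.items.foldl (fun roles kv =>
        if PySem.Str.lower group = PySem.Str.lower kv.1 then PySem.Set.add roles kv.2 else roles) roles)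
      PySem.Set.empty
  PySem.List.sorted roles (fun x => x) false

-- ===== PORT B =====
-- B: lowered = {g.lower() for g in groups}; matched = [role for key, role in items if key.lower() in lowered]; sorted(set(matched)).
def map_groups_to_roles_py_alt (groups : List String) (role_mapping : List (String × String)) : List String :=
  let lowered : PySem.Set String := PySem.Set.ofList (groups.map PySem.Str.lower)
  let matched : List String :=
    (((PySem.Dict.ofList role_mapping).items.filter
        (fun kv => PySem.Set.contains lowered (PySem.Str.lower kv.1))).map Prod.snd)
  PySem.List.sorted (PySem.Set.ofList matched) (fun x => x) false

-- ===== PRECONDITION & SPEC =====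
def Spec_map_groups_to_roles_py (groups : List String) (role_mapping : List (String × String)) (out : List String) : Prop := out = map_groups_to_roles_py_alt groups role_mapping
instance (groups : List String) (role_mapping : List (String × String)) (out : List String) : Decidable (Spec_map_groups_to_roles_py groups role_mapping out) := by unfold Spec_map_groups_to_roles_py; infer_instance

-- ===== CLAIM (what is proved, stated in full; the proofs are below) =====
def Claim_equal_map_groups_to_roles_py : Prop := ∀ (groups : List String) (role_mapping : List (String × String)), Dom_map_groups_to_roles_py groups role_mapping → Spec_map_groups_to_roles_py groups role_mapping (map_groups_to_roles_py groups role_mapping)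

-- ===== LEMMAS AND PROOFS =====

-- membership in a guarded add-fold (A's inner loop shape)
theorem mem_foldl_add_if {α : Type} (L : List α) (p : α → Prop) [DecidablePred p] (f : α → String)
    (s : PySem.Set String) (y : String) :
    y ∈ L.foldl (fun s a => if p a then PySem.Set.add s (f a) else s) s ↔
      y ∈ s ∨ ∃ a ∈ L, p a ∧ y = f a := by
  induction L generalizing s with
  | nil => simp
  | cons a L ih =>
    simp only [List.foldl_cons, ih, List.mem_cons]
    by_cases hp : p a
    · simp only [if_pos hp, PySem.Set.mem_add]
      constructor
      · rintro (⟨h | h⟩ | ⟨b, hb, hpb, hy⟩)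
        · exact Or.inl h
        · exact Or.inr ⟨a, Or.inl rfl, hp, h⟩
        · exact Or.inr ⟨b, Or.inr hb, hpb, hy⟩
      · rintro (h | ⟨b, hb | hb, hpb, hy⟩)
        · exact Or.inl (Or.inl h)
        · subst hb; exact Or.inl (Or.inr hy)
        · exact Or.inr ⟨b, hb, hpb, hy⟩
    · simp only [if_neg hp]
      constructor
      · rintro (h | ⟨b, hb, hpb, hy⟩)
        · exact Or.inl h
        · exact Or.inr ⟨b, Or.inr hb, hpb, hy⟩
      · rintro (h | ⟨b, hb | hb, hpb, hy⟩)
        · exact Or.inl h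
        · exact absurd (hb ▸ hpb) hp
        · exact Or.inr ⟨b, hb, hpb, hy⟩

-- nodup preserved by a guarded add-fold
theorem nodup_foldl_add_if {α : Type} (L : List α) (p : α → Prop) [DecidablePred p] (f : α → String)
    (s : PySem.Set String) (hs : s.Nodup) :
    (L.foldl (fun s a => if p a then PySem.Set.add s (f a) else s) s).Nodup := by
  induction L generalizing s with
  | nil => exact hs
  | cons a L ih =>
    simp only [List.foldl_cons]
    apply ih
    by_cases hp : p a
    · rw [if_pos hp]; exact PySem.Set.nodup_add s (f a) hs
    · rwa [if_neg hp]

-- one step of A's outer loop, as a function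
def pvStepA (d : PySem.Dict String String) (roles : PySem.Set String) (group : String) : PySem.Set String :=
  d.items.foldl (fun roles kv =>
    if PySem.Str.lower group = PySem.Str.lower kv.1 then PySem.Set.add roles kv.2 else roles)
    (match d.get? group with
      | some r => PySem.Set.add roles r
      | none => roles)

theorem mem_stepA (d : PySem.Dict String String) (roles : PySem.Set String) (group y : String) :
    y ∈ pvStepA d roles group ↔
      y ∈ roles ∨ ∃ kv ∈ d.items, PySem.Str.lower group = PySem.Str.lower kv.1 ∧ y = kv.2 := by
  unfold pvStepA
  rw [mem_foldl_add_if d.items (fun kv => PySem.Str.lower group = PySem.Str.lower kv.1) (fun kv => kv.2)]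
  constructor
  · rintro (h | h)
    · cases hg : d.get? group with
      | some r =>
        simp only [hg, PySem.Set.mem_add] at h
        rcases h with h | h
        · exact Or.inl h
        · exact Or.inr ⟨(group, r), PySem.Dict.mem_items_of_get?_eq_some d hg, rfl, h⟩
      | none => rw [hg] at h; exact Or.inl h
    · exact Or.inr h
  · rintro (h | h)
    · left
      cases hg : d.get? group with
      | some r => simp [PySem.Set.mem_add, h]
      | none => simpa [hg] using h
    · exact Or.inr h

theorem nodup_stepA (d : PySem.Dict String String) (roles : PySem.Set String) (group : String)
    (hs : roles.Nodup) : (pvStepA d roles group).Nodup := by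
  unfold pvStepA
  apply nodup_foldl_add_if
  cases hg : d.get? group with
  | some r => exact PySem.Set.nodup_add roles r hs
  | none => exact hs

theorem mem_foldl_stepA (d : PySem.Dict String String) (groups : List String)
    (s : PySem.Set String) (y : String) :
    y ∈ groups.foldl (pvStepA d) s ↔
      y ∈ s ∨ ∃ g ∈ groups, ∃ kv ∈ d.items, PySem.Str.lower g = PySem.Str.lower kv.1 ∧ y = kv.2 := by
  induction groups generalizing s with
  | nil => simp
  | cons g groups ih =>
    simp only [List.foldl_cons, ih, mem_stepA, List.mem_cons]
    constructor
    · rintro ((h | ⟨kv, hkv, hl, hy⟩) | ⟨g', hg', h⟩)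
      · exact Or.inl h
      · exact Or.inr ⟨g, Or.inl rfl, kv, hkv, hl, hy⟩
      · exact Or.inr ⟨g', Or.inr hg', h⟩
    · rintro (h | ⟨g', hg' | hg', h⟩)
      · exact Or.inl (Or.inl h)
      · subst hg'; exact Or.inl (Or.inr h)
      · exact Or.inr ⟨g', hg', h⟩

theorem nodup_foldl_stepA (d : PySem.Dict String String) (groups : List String)
    (s : PySem.Set String) (hs : s.Nodup) : (groups.foldl (pvStepA d) s).Nodup := by
  induction groups generalizing s with
  | nil => exact hs
  | cons g groups ih => exact ih _ (nodup_stepA d s g hs)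

-- ===== VERDICT (by name: the statement is the Claim_ definition above) =====
theorem map_groups_to_roles_py_spec : Claim_equal_map_groups_to_roles_py := by
  intro groups role_mapping _
  unfold Spec_map_groups_to_roles_py map_groups_to_roles_py map_groups_to_roles_py_alt
  set d := PySem.Dict.ofList role_mapping with hd
  show PySem.List.sorted (groups.foldl (pvStepA d) PySem.Set.empty) (fun x => x) false =
    PySem.List.sorted (PySem.Set.ofList
      ((d.items.filter
        (fun kv => PySem.Set.contains (PySem.Set.ofList (groups.map PySem.Str.lower)) (PySem.Str.lower kv.1))).map Prod.snd))
      (fun x => x) false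
  apply PySem.List.sorted_eq_sorted_of_perm
  · intro a b h; exact h
  · refine (List.perm_ext_iff_of_nodup (nodup_foldl_stepA d groups PySem.Set.empty List.nodup_nil)
        (PySem.Set.nodup_ofList _)).mpr ?_
    intro y
    rw [mem_foldl_stepA, PySem.Set.mem_ofList]
    simp only [PySem.Set.empty, List.not_mem_nil, false_or, List.mem_map, List.mem_filter,
      PySem.Set.contains_eq_listContains, List.contains_iff_mem, PySem.Set.mem_ofList, List.mem_map]
    constructor
    · rintro ⟨g, hg, kv, hkv, hl, hy⟩
      exact ⟨kv, ⟨hkv, ⟨g, hg, hl⟩⟩, hy.symm⟩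
    · rintro ⟨kv, ⟨hkv, g, hg, hl⟩, hy⟩
      exact ⟨g, hg, kv, hkv, hl, hy.symm⟩
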